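-- pv_equiv track=rewrite | github.com/namel3ss-Ai/namel3ss | src/namel3ss/runtime/tools/schema_validate.py | _foreign_sample_value
-- ===== SOURCE A (Python) =====
-- def _foreign_sample_value(field_type: str) -> str:
--     if field_type.startswith("list of "):
--         item_type = field_type[len("list of "):].strip()
--         return f"[{_foreign_sample_value(item_type)}]"
--     if field_type == "text":
--         return '"value"'
--     if field_type == "number":
--         return "1"
--     if field_type == "boolean":
--         return "true"
--     return '"value"'
-- ===== SOURCE B (Python) =====
-- def _foreign_sample_value(field_type: str) -> str:
--     count = 0
--     s = field_type
--     while s.startswith("list of "):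
--         s = s[len("list of "):].strip()
--         count += 1
--     if s == "text":
--         base = '"value"'
--     elif s == "number":
--         base = "1"
--     elif s == "boolean":
--         base = "true"
--     else:
--         base = '"value"'
--     return "[" * count + base + "]" * count
-- ===== Notes on version B (the rewrite author's own statement) =====
-- stated objective: alternative
-- what changed: Replaced the recursive descent (each level wraps the recursive result in brackets) with an iterative peel: a while loop strips 'list of ' prefixes counting depth, then one leaf lookup, then the brackets are added in bulk via string repetition.
import Mathlib
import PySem

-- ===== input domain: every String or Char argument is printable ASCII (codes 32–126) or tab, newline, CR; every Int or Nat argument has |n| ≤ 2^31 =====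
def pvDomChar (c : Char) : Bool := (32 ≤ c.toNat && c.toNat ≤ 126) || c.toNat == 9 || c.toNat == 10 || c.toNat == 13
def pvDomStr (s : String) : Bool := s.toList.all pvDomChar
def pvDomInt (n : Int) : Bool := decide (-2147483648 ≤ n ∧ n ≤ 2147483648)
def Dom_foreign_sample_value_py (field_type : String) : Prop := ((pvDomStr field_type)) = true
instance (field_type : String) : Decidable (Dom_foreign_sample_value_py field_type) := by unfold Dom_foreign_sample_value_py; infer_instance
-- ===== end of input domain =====

-- B replaces A's recursive bracket-wrapping with an iterative peel (count the 'list of ' prefixes,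
-- then one leaf lookup, then bulk bracket repetition); alternative decomposition, same behaviour.

-- termination measure lemma, cited by both ports' decreasing_by
theorem pv_peel_shrink (s : String) (h : PySem.Str.startswith s "list of " = true) :
    (PySem.Str.strip (PySem.Str.slice s (some 8) none)).toList.length < s.toList.length := by
  rw [PySem.Str.startswith_eq, PySem.Chars.startswith_iff] at h
  have h8 : 8 ≤ s.toList.length := by
    have := h.length_le; simpa using this
  have hslice : (PySem.Str.slice s (some 8) none).toList = s.toList.drop 8 := by
    rw [PySem.Str.toList_slice, PySem.Chars.slice_eq_listSlice,
        PySem.List.slice_from _ (by norm_num)]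
    simp
  rw [PySem.Str.toList_strip, hslice]
  have hle : (PySem.Chars.strip (s.toList.drop 8)).length ≤ (s.toList.drop 8).length := by
    unfold PySem.Chars.strip PySem.Chars.rstrip PySem.Chars.lstrip
    simp only [List.length_reverse]
    exact le_trans (List.length_dropWhile_le _ _)
      (by simpa using (List.length_dropWhile_le PySem.Chars.isspace (s.toList.drop 8)))
  have : (s.toList.drop 8).length = s.toList.length - 8 := by simp
  omega

-- ===== PORT A =====
def foreign_sample_value_py (field_type : String) : String :=
  if h : PySem.Str.startswith field_type "list of " then
    let item_type := PySem.Str.strip (PySem.Str.slice field_type (some 8) none)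
    "[" ++ foreign_sample_value_py item_type ++ "]"
  else if field_type == "text" then "\"value\""
  else if field_type == "number" then "1"
  else if field_type == "boolean" then "true"
  else "\"value\""
termination_by field_type.toList.length
decreasing_by exact pv_peel_shrink field_type h

-- ===== PORT B =====
-- B's while loop: peel 'list of ' prefixes, counting depth (tail recursion = the loop)
def pvPeel (s : String) (count : Nat) : Nat × String :=
  if h : PySem.Str.startswith s "list of " then
    pvPeel (PySem.Str.strip (PySem.Str.slice s (some 8) none)) (count + 1)
  else (count, s)
termination_by s.toList.length
decreasing_by exact pv_peel_shrink s h

def pvBaseSample (s : String) : String :=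
  if s == "text" then "\"value\""
  else if s == "number" then "1"
  else if s == "boolean" then "true"
  else "\"value\""

def foreign_sample_value_py_alt (field_type : String) : String :=
  let p := pvPeel field_type 0
  String.ofList (List.replicate p.1 '[') ++ pvBaseSample p.2 ++ String.ofList (List.replicate p.1 ']')

-- ===== PRECONDITION & SPEC =====
def Spec_foreign_sample_value_py (field_type : String) (out : String) : Prop := out = foreign_sample_value_py_alt field_type
instance (field_type : String) (out : String) : Decidable (Spec_foreign_sample_value_py field_type out) := by unfold Spec_foreign_sample_value_py; infer_instance

-- ===== CLAIM (what is proved, stated in full; the proofs are below) =====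
def Claim_equal_foreign_sample_value_py : Prop := ∀ (field_type : String), Dom_foreign_sample_value_py field_type → Spec_foreign_sample_value_py field_type (foreign_sample_value_py field_type)

-- ===== LEMMAS AND PROOFS =====

-- the loop counter only shifts the first component of the peel result
theorem pvPeel_shift : ∀ (k : Nat) (s : String), s.toList.length ≤ k →
    ∀ n, pvPeel s n = ((pvPeel s 0).1 + n, (pvPeel s 0).2) := by
  intro k
  induction k with
  | zero =>
    intro s hk n
    have h : ¬ PySem.Str.startswith s "list of " = true := by
      intro h
      exact absurd (pv_peel_shrink s h) (by omega)
    rw [pvPeel, dif_neg h, pvPeel, dif_neg h]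
    simp
  | succ k ih =>
    intro s hk n
    by_cases h : PySem.Str.startswith s "list of " = true
    · have hlt := pv_peel_shrink s h
      have h0 : pvPeel s 0 = pvPeel (PySem.Str.strip (PySem.Str.slice s (some 8) none)) 1 := by
        rw [pvPeel, dif_pos h]
      rw [pvPeel, dif_pos h]
      rw [h0, ih _ (by omega) (n + 1), ih _ (by omega) 1]
      simp [Prod.ext_iff]
      omega
    · rw [pvPeel, dif_neg h, pvPeel, dif_neg h]
      simp

theorem pv_A_eq_aux : ∀ (k : Nat) (s : String), s.toList.length ≤ k →
    foreign_sample_value_py s =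
      String.ofList (List.replicate (pvPeel s 0).1 '[') ++ pvBaseSample (pvPeel s 0).2
        ++ String.ofList (List.replicate (pvPeel s 0).1 ']') := by
  intro k
  induction k with
  | zero =>
    intro s hk
    have h : ¬ PySem.Str.startswith s "list of " = true := by
      intro h
      exact absurd (pv_peel_shrink s h) (by omega)
    rw [foreign_sample_value_py, dif_neg h, pvPeel, dif_neg h]
    simp [pvBaseSample]
  | succ k ih =>
    intro s hk
    by_cases h : PySem.Str.startswith s "list of " = true
    · have hlt := pv_peel_shrink s h
      have h0 : pvPeel s 0 = pvPeel (PySem.Str.strip (PySem.Str.slice s (some 8) none)) 1 := by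
        rw [pvPeel, dif_pos h]
      rw [foreign_sample_value_py, dif_pos h]
      show "[" ++ foreign_sample_value_py (PySem.Str.strip (PySem.Str.slice s (some 8) none)) ++ "]" = _
      rw [ih _ (by omega), h0,
          pvPeel_shift k (PySem.Str.strip (PySem.Str.slice s (some 8) none)) (by omega) 1]
      rw [← String.toList_inj]
      simp [List.replicate_succ]
      rw [← List.replicate_succ', List.replicate_succ]
    · rw [foreign_sample_value_py, dif_neg h, pvPeel, dif_neg h]
      simp [pvBaseSample]

theorem pv_A_eq (s : String) :
    foreign_sample_value_py s =
      String.ofList (List.replicate (pvPeel s 0).1 '[') ++ pvBaseSample (pvPeel s 0).2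
        ++ String.ofList (List.replicate (pvPeel s 0).1 ']') :=
  pv_A_eq_aux s.toList.length s le_rfl

-- ===== VERDICT (by name: the statement is the Claim_ definition above) =====
theorem foreign_sample_value_py_spec : Claim_equal_foreign_sample_value_py := by
  intro s _
  unfold Spec_foreign_sample_value_py foreign_sample_value_py_alt
  exact pv_A_eq s
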